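-- pv_equiv track=rewrite | github.com/wxy2ab/akinterpreter | core/rag/memeory.py | _process_stream_result
-- ===== SOURCE A (Python) =====
-- from typing import List, Dict, Any, Union, Generator
--
-- def _process_stream_result(stream: Generator[str, None, None]) -> Generator[str, None, None]:
--     buffer = ""
--     for chunk in stream:
--         buffer += chunk
--         lines = buffer.split('\n')
--         for line in lines[:-1]:
--             if ':' in line:
--                 line = line.split(':', 1)[1].strip()
--             yield line + '\n'
--         buffer = lines[-1]
--     if buffer:
--         if ':' in buffer:
--             buffer = buffer.split(':', 1)[1].strip()
--         yield buffer
-- ===== SOURCE B (Python) =====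
-- def _process_stream_result(stream):
--     text = ''.join(stream)
--     parts = text.split('\n')
--
--     def transform(line):
--         if ':' in line:
--             return line.split(':', 1)[1].strip()
--         return line
--
--     for line in parts[:-1]:
--         yield transform(line) + '\n'
--     if parts[-1]:
--         yield transform(parts[-1])
-- ===== Notes on version B (the rewrite author's own statement) =====
-- stated objective: faster
-- what changed: B drops A's incremental buffer: it joins the whole stream once and splits once on newline, instead of re-splitting a growing buffer after every chunk, which is quadratic when chunks carry no newline.
import Mathlib
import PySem

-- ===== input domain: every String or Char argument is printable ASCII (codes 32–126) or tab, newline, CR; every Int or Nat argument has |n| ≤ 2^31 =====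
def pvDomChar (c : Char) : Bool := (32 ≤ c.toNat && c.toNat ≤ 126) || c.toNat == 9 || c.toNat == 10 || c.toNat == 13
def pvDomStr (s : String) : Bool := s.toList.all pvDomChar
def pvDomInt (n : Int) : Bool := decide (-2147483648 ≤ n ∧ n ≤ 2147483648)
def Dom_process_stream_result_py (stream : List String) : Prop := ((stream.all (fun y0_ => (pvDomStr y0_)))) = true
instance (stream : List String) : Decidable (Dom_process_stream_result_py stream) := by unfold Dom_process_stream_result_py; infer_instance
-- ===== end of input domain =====

-- B replaces A's chunk-by-chunk buffer (re-split after every chunk, quadratic on newline-free chunks) with a single join-then-split pass; measured faster at the large sizes. Return-value equivalence.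


-- transform of one line: identical inline code in Source A and Source B ("if ':' in line: line = line.split(':', 1)[1].strip()")
def pvTransform (l : List Char) : List Char :=
  if PySem.Chars.isIn [':'] l then
    PySem.Chars.strip (PySem.List.pyGetD (PySem.Chars.splitOnMax l [':'] 1) 1 [])
  else l

-- ===== PORT A =====
-- state: (buffer as chars, yielded lines); `lines[:-1]` is slice none (some (-1)), `lines[-1]` is pyGet? at -1
-- (lines = buffer.split('\n') is never empty, so the `.getD []` default is never used — exact).
def process_stream_result_py (stream : List String) : List String :=
  let st := stream.foldl
    (fun (st : List Char × List String) chunk =>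
      let buffer := st.1 ++ chunk.toList
      let lines := PySem.Chars.splitOn buffer ['\n']
      ((PySem.List.pyGet? lines (-1)).getD [],
       st.2 ++ (PySem.List.slice lines none (some (-1))).map
         (fun line => String.ofList (pvTransform line ++ ['\n']))))
    ([], [])
  if st.1 ≠ [] then st.2 ++ [String.ofList (pvTransform st.1)] else st.2

-- ===== PORT B =====
def process_stream_result_py_alt (stream : List String) : List String :=
  let text := PySem.Chars.join [] (stream.map String.toList)
  let parts := PySem.Chars.splitOn text ['\n']
  (PySem.List.slice parts none (some (-1))).map
      (fun line => String.ofList (pvTransform line ++ ['\n']))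
    ++ (if (PySem.List.pyGet? parts (-1)).getD [] ≠ [] then
          [String.ofList (pvTransform ((PySem.List.pyGet? parts (-1)).getD []))]
        else [])

-- ===== PRECONDITION & SPEC =====
def Spec_process_stream_result_py (stream : List String) (out : List String) : Prop := out = process_stream_result_py_alt stream
instance (stream : List String) (out : List String) : Decidable (Spec_process_stream_result_py stream out) := by unfold Spec_process_stream_result_py; infer_instance

-- ===== CLAIM (what is proved, stated in full; the proofs are below) =====
def Claim_equal_process_stream_result_py : Prop := ∀ (stream : List String), Dom_process_stream_result_py stream → Spec_process_stream_result_py stream (process_stream_result_py stream)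

-- ===== LEMMAS AND PROOFS =====

-- structural model of s.split(c) for a one-character separator
def pvSplit (c : Char) : List Char → List (List Char)
  | [] => [[]]
  | x :: xs => if x = c then [] :: pvSplit c xs else (pvSplit c xs).modifyHead (x :: ·)

theorem pvSplit_ne_nil (c : Char) (l : List Char) : pvSplit c l ≠ [] := by
  cases l with
  | nil => simp [pvSplit]
  | cons x xs => simp only [pvSplit]; split_ifs <;> simp [List.modifyHead_eq_nil_iff, pvSplit_ne_nil c xs]

theorem modifyHead_triv {α : Type} (l : List α) : List.modifyHead (fun t => t) l = l := by
  cases l <;> rfl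

theorem go_eq (c : Char) (fuel : Nat) : ∀ (l cur : List Char) (acc : List (List Char)), l.length ≤ fuel →
    PySem.Chars.splitOn.go [c] fuel l cur acc
      = acc.reverse ++ (pvSplit c l).modifyHead (fun t => cur.reverse ++ t) := by
  induction fuel with
  | zero =>
    intro l cur acc h
    have : l = [] := List.eq_nil_of_length_eq_zero (Nat.le_zero.mp h)
    subst this
    simp [PySem.Chars.splitOn.go, pvSplit]
  | succ n ih =>
    intro l cur acc h
    cases l with
    | nil => simp [PySem.Chars.splitOn.go, pvSplit]
    | cons x xs =>
      have hx : xs.length ≤ n := by simpa using h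
      by_cases hc : x = c
      · subst hc
        have h1 : PySem.Chars.splitOn.go [x] (n+1) (x::xs) cur acc
            = PySem.Chars.splitOn.go [x] n xs [] (cur.reverse :: acc) := by
          simp [PySem.Chars.splitOn.go, List.isPrefixOf]
        rw [h1, ih xs [] _ hx]
        simp [pvSplit, modifyHead_triv]
      · have h1 : PySem.Chars.splitOn.go [c] (n+1) (x::xs) cur acc
            = PySem.Chars.splitOn.go [c] n xs (x :: cur) acc := by
          simp [PySem.Chars.splitOn.go, List.isPrefixOf, Ne.symm hc]
        rw [h1, ih xs (x :: cur) _ hx]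
        simp only [pvSplit, if_neg hc]
        obtain ⟨h0, t, ht⟩ := List.exists_cons_of_ne_nil (pvSplit_ne_nil c xs)
        simp [ht]

theorem splitOn_eq (c : Char) (l : List Char) : PySem.Chars.splitOn l [c] = pvSplit c l := by
  have := go_eq c (l.length + 1) l [] [] (by omega)
  simpa [PySem.Chars.splitOn, modifyHead_triv] using this

theorem not_mem_getLastD (c : Char) (l : List Char) : c ∉ (pvSplit c l).getLastD [] := by
  induction l with
  | nil => simp [pvSplit]
  | cons x xs ih =>
    simp only [pvSplit]
    split_ifs with hc
    · rw [List.getLastD_cons]; exact ih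
    · obtain ⟨h0, t, ht⟩ := List.exists_cons_of_ne_nil (pvSplit_ne_nil c xs)
      rw [ht] at ih ⊢
      cases t with
      | nil =>
        simp only [List.modifyHead, List.getLastD_eq_getLast?, List.getLast?_singleton,
          Option.getD_some] at *
        simp only [List.mem_cons, not_or]
        exact ⟨fun h => hc h.symm, ih⟩
      | cons a' t' =>
        simp only [List.modifyHead, List.getLastD_eq_getLast?, List.getLast?_cons_cons] at *
        exact ih

theorem pvSplit_cons_ne (c x : Char) (l : List Char) (hc : ¬ x = c) :
    pvSplit c (x :: l) = (pvSplit c l).modifyHead (x :: ·) := by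
  simp [pvSplit, hc]

theorem pvSplit_append (c : Char) (a b : List Char) :
    pvSplit c (a ++ b) = (pvSplit c a).dropLast ++ pvSplit c ((pvSplit c a).getLastD [] ++ b) := by
  induction a with
  | nil => simp [pvSplit]
  | cons x xs ih =>
    by_cases hc : x = c
    · subst hc
      show pvSplit x (x :: (xs ++ b)) = _
      simp only [pvSplit, if_true]
      rw [List.dropLast_cons_of_ne_nil (pvSplit_ne_nil x xs), List.getLastD_cons]
      simp [ih]
    · obtain ⟨h0, t, ht⟩ := List.exists_cons_of_ne_nil (pvSplit_ne_nil c xs)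
      have lhs : pvSplit c ((x :: xs) ++ b) = (pvSplit c (xs ++ b)).modifyHead (x :: ·) := by
        rw [List.cons_append]; exact pvSplit_cons_ne c x _ hc
      rw [lhs, ih, ht, pvSplit_cons_ne c x xs hc, ht]
      cases t with
      | nil =>
        simp only [List.dropLast_singleton, List.nil_append, List.modifyHead,
          List.getLastD_eq_getLast?, List.getLast?_singleton, Option.getD_some]
        rw [show (x :: h0) ++ b = x :: (h0 ++ b) from rfl, pvSplit_cons_ne c x _ hc]
        cases hP : pvSplit c (h0 ++ b) <;> simp [List.modifyHead]
      | cons a' t' =>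
        simp [List.modifyHead, List.getLastD_eq_getLast?, List.getLast?_cons]

theorem pvSplit_no_sep (c : Char) (l : List Char) (h : c ∉ l) : pvSplit c l = [l] := by
  induction l with
  | nil => rfl
  | cons x xs ih =>
    simp only [List.mem_cons, not_or] at h
    have hx : ¬ x = c := fun e => h.1 e.symm
    simp [pvSplit, hx, ih h.2, List.modifyHead]

theorem slice_dropLast {α : Type} (xs : List α) :
    PySem.List.slice xs none (some (-1)) = xs.dropLast := by
  simp [PySem.List.slice, List.dropLast_eq_take]

theorem pyGet_neg_one {α : Type} (xs : List α) (d : α) :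
    (PySem.List.pyGet? xs (-1)).getD d = xs.getLastD d := by
  cases xs with
  | nil => simp [PySem.List.pyGet?, PySem.List.pyIdx?]
  | cons x l => simp [PySem.List.pyGet?, PySem.List.pyIdx?, List.getLastD_eq_getLast?,
      List.getLast?_eq_getElem?]

theorem join_nil_flatten (ls : List (List Char)) : PySem.Chars.join [] ls = ls.flatten := by
  induction ls with
  | nil => rfl
  | cons h t ih => cases t <;> simp_all [PySem.Chars.join, List.intercalate, List.intersperse]

-- loop invariant of A's fold: the buffer is the last piece of the split of everything seen,
-- and the yielded lines are the transformed earlier pieces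
def pvStep (st : List Char × List String) (chunk : String) : List Char × List String :=
  ((pvSplit '\n' (st.1 ++ chunk.toList)).getLastD [],
   st.2 ++ (pvSplit '\n' (st.1 ++ chunk.toList)).dropLast.map
     (fun line => String.ofList (pvTransform line ++ ['\n'])))

theorem step_eq :
    (fun (st : List Char × List String) chunk =>
      let buffer := st.1 ++ chunk.toList
      let lines := PySem.Chars.splitOn buffer ['\n']
      ((PySem.List.pyGet? lines (-1)).getD [],
       st.2 ++ (PySem.List.slice lines none (some (-1))).map
         (fun line => String.ofList (pvTransform line ++ ['\n']))))
    = pvStep := by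
  funext st chunk
  simp [pvStep, splitOn_eq, slice_dropLast, pyGet_neg_one]

theorem foldA (cs : List String) : ∀ (buf : List Char) (acc : List String), '\n' ∉ buf →
    cs.foldl pvStep (buf, acc)
    = ((pvSplit '\n' (buf ++ (cs.map String.toList).flatten)).getLastD [],
       acc ++ ((pvSplit '\n' (buf ++ (cs.map String.toList).flatten)).dropLast.map
         (fun line => String.ofList (pvTransform line ++ ['\n'])))) := by
  induction cs with
  | nil =>
    intro buf acc hb
    simp [pvSplit_no_sep '\n' buf hb]
  | cons ch rest ih =>
    intro buf acc hb
    rw [List.foldl_cons]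
    show List.foldl pvStep (pvStep (buf, acc) ch) rest = _
    rw [show pvStep (buf, acc) ch
        = ((pvSplit '\n' (buf ++ ch.toList)).getLastD [],
           acc ++ (pvSplit '\n' (buf ++ ch.toList)).dropLast.map
             (fun line => String.ofList (pvTransform line ++ ['\n']))) from rfl]
    rw [ih _ _ (not_mem_getLastD '\n' (buf ++ ch.toList))]
    have hsp := pvSplit_append '\n' (buf ++ ch.toList) ((rest.map String.toList).flatten)
    have hne := pvSplit_ne_nil '\n' ((pvSplit '\n' (buf ++ ch.toList)).getLastD []
      ++ (rest.map String.toList).flatten)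
    rw [Prod.mk.injEq]
    refine ⟨?_, ?_⟩
    · rw [show buf ++ (List.map String.toList (ch :: rest)).flatten
          = (buf ++ ch.toList) ++ (rest.map String.toList).flatten by simp, hsp]
      simp only [List.getLastD_eq_getLast?] at hne ⊢
      rw [List.getLast?_append_of_ne_nil _ hne, List.getLast?_eq_some_getLast hne]
    · rw [show buf ++ (List.map String.toList (ch :: rest)).flatten
          = (buf ++ ch.toList) ++ (rest.map String.toList).flatten by simp, hsp,
        List.dropLast_append_of_ne_nil hne]
      simp

-- ===== VERDICT (by name: the statement is the Claim_ definition above) =====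
theorem process_stream_result_py_spec : Claim_equal_process_stream_result_py := by
  intro stream _
  unfold Spec_process_stream_result_py process_stream_result_py process_stream_result_py_alt
  rw [step_eq, foldA stream [] [] (by simp)]
  simp only [join_nil_flatten, splitOn_eq, slice_dropLast, pyGet_neg_one, List.nil_append]
  by_cases h : (pvSplit '\n' ((stream.map String.toList).flatten)).getLast?.getD ([] : List Char) = [] <;>
    simp [h, List.getLastD_eq_getLast?]
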